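-- pv_equiv track=rewrite | github.com/ram97-boop/Representative-Sequence | src/count_indel_mismatch.py | countIndelsMismatches
-- ===== SOURCE A (Python) =====
-- def countIndelsMismatches(alignmentDictionary):
--     '''
--     '''
--     sequenceList = list(alignmentDictionary.values())
--     count = 0
--     for i in range(len(sequenceList[0])): # i.e. for each column of the alignment.
--         characterList = []
--         isIndelMismatch = False
--         for sequence in sequenceList: # for each sequence in the alignment.
--             if sequence[i] == "-": # if this column of the sequence is an indel.
--                 isIndelMismatch = True
--                 break
--
--             characterList.append(sequence[i])
--
--         if not isIndelMismatch: # if there is no indel in this column of the alignment.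
--             character1 = characterList[0]
--             for char in characterList[1:]:
--                 if character1 != char: # mismatch.
--                     isIndelMismatch = True
--                     break
--
--                 character1 = char
--
--         if isIndelMismatch:
--             count += 1
--
--     return count
-- ===== SOURCE B (Python) =====
-- def countIndelsMismatches(alignmentDictionary):
--     sequenceList = list(alignmentDictionary.values())
--     first = sequenceList[0]
--     L = len(first)
--     bad = [c == "-" for c in first]
--     for seq in sequenceList[1:]:
--         for i, c in enumerate(seq[:L]):
--             if c == "-" or c != first[i]:
--                 bad[i] = True
--     return sum(bad)
-- ===== Notes on version B (the rewrite author's own statement) =====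
-- stated objective: alternative
-- what changed: B traverses the alignment row-major instead of column-major: it initializes a boolean mask from gaps in the first sequence and, for each other sequence in one pass, marks positions that hold '-' or differ from the first sequence, returning sum(mask); A instead scans each column with an early-break indel scan followed by an adjacent-pair mismatch loop.
-- outside the precondition, e.g. on countIndelsMismatches({}): A raises IndexError, B raises IndexError; on countIndelsMismatches({'a': 'AB', 'b': 'A'}): A raises IndexError, B returns 0
import Mathlib
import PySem

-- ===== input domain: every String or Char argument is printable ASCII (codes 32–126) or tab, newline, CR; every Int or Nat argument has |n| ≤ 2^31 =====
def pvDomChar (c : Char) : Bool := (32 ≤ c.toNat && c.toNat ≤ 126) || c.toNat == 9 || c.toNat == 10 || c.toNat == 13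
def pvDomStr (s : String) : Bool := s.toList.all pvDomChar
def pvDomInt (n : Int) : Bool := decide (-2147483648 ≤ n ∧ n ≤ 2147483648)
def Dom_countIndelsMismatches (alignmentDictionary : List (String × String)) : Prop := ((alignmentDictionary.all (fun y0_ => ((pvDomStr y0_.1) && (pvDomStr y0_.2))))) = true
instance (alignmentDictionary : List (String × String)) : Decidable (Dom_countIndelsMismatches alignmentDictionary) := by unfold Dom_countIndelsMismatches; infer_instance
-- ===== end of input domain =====

-- B traverses the alignment row-major with a boolean mask (gap in first sequence, then each other
-- sequence marks positions holding '-' or differing from the first) and returns sum(mask), instead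
-- of A's column-major early-break indel scan plus adjacent-pair mismatch loop; same asymptotic cost.

-- ===== PORT A =====
-- list(alignmentDictionary.values()), as lists of characters
def pvVals (alignmentDictionary : List (String × String)) : List (List Char) :=
  ((PySem.Dict.ofList alignmentDictionary).values).map String.toList

-- the inner 'for sequence in sequenceList' loop: returns (isIndelMismatch, characterList).
-- sequence[i] is ported as getD: every access this loop performs is in range for every input
-- admitted by Pre_ (Python raises IndexError on the out-of-range accesses Pre_ excludes).
def pvScanColA (i : Nat) (acc : List Char) : List (List Char) → Bool × List Char
  | [] => (false, acc)
  | s :: rest =>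
      if s.getD i ' ' = '-' then (true, acc)
      else pvScanColA i (acc ++ [s.getD i ' ']) rest

-- the 'for char in characterList[1:]' loop with character1 threaded through
def pvMismatchA (character1 : Char) : List Char → Bool
  | [] => false
  | c :: rest => if character1 ≠ c then true else pvMismatchA c rest

-- 'character1 = characterList[0]' then the adjacent-pair loop
-- (characterList is nonempty whenever this runs under Pre_; Python would raise on [])
def pvMismatchList : List Char → Bool
  | [] => false
  | c :: rest => pvMismatchA c rest

-- the body of the outer 'for i in range(...)' loop: is column i an indel/mismatch column?
def pvColBoolA (sequenceList : List (List Char)) (i : Nat) : Bool :=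
  let r := pvScanColA i [] sequenceList
  if r.1 then true else pvMismatchList r.2

def countIndelsMismatches (alignmentDictionary : List (String × String)) : Int :=
  let sequenceList := pvVals alignmentDictionary
  -- len(sequenceList[0]): Python raises IndexError on an empty dict; Pre_ excludes it
  let n := (sequenceList.headD []).length
  (PySem.List.pyRange 0 (n : Int) 1).foldl
    (fun count i => if pvColBoolA sequenceList i.toNat then count + 1 else count) 0

-- ===== PORT B =====
-- the inner 'for i, c in enumerate(seq[:L]): if c == "-" or c != first[i]: bad[i] = True' loop
def pvMarkRow (first : List Char) : List Bool → List (Int × Char) → List Bool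
  | bad, [] => bad
  | bad, (i, c) :: rest =>
      pvMarkRow first
        (if c == '-' || c != first.getD i.toNat ' ' then bad.set i.toNat true else bad) rest

def countIndelsMismatches_alt (alignmentDictionary : List (String × String)) : Int :=
  let sequenceList := pvVals alignmentDictionary
  -- first = sequenceList[0]: Python raises IndexError on an empty dict; Pre_ excludes it
  let first := sequenceList.headD []
  let L := first.length
  let bad0 := first.map (fun c => c == '-')
  let bad := (sequenceList.drop 1).foldl
    (fun bad s => pvMarkRow first bad (PySem.List.enumerate (s.take L) 0)) bad0
  ((bad.countP (fun b => b) : Nat) : Int)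

-- ===== PRECONDITION & SPEC =====
-- Pre_ is exactly the inputs on which the Python A returns: a non-empty dict (else sequenceList[0]
-- raises IndexError), and in every column of the first sequence, any sequence too short for that
-- column is preceded by a sequence carrying '-' there (else sequence[i] raises IndexError).
def Pre_countIndelsMismatches (alignmentDictionary : List (String × String)) : Prop :=
  ((PySem.Dict.ofList alignmentDictionary).values).map String.toList ≠ [] ∧
  ∀ i < ((((PySem.Dict.ofList alignmentDictionary).values).map String.toList).headD []).length,
    ∀ k < (((PySem.Dict.ofList alignmentDictionary).values).map String.toList).length,
      (((((PySem.Dict.ofList alignmentDictionary).values).map String.toList).getD k []).length ≤ i →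
        ∃ j < k, ((((PySem.Dict.ofList alignmentDictionary).values).map String.toList).getD j []).getD i ' ' = '-')
instance (alignmentDictionary : List (String × String)) : Decidable (Pre_countIndelsMismatches alignmentDictionary) := by unfold Pre_countIndelsMismatches; infer_instance

def pvWitness_countIndelsMismatches : (List (String × String)) := [("s1", "AC-A"), ("s2", "ACGA")]

def Spec_countIndelsMismatches (alignmentDictionary : List (String × String)) (out : Int) : Prop := out = countIndelsMismatches_alt alignmentDictionary
instance (alignmentDictionary : List (String × String)) (out : Int) : Decidable (Spec_countIndelsMismatches alignmentDictionary out) := by unfold Spec_countIndelsMismatches; infer_instance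

-- ===== CLAIM (what is proved, stated in full; the proofs are below) =====
def Claim_equal_countIndelsMismatches : Prop := ∀ (alignmentDictionary : List (String × String)), Dom_countIndelsMismatches alignmentDictionary → Pre_countIndelsMismatches alignmentDictionary → Spec_countIndelsMismatches alignmentDictionary (countIndelsMismatches alignmentDictionary)

-- ===== LEMMAS AND PROOFS =====

-- ---- A-side characterisation (per column) ----
-- A's inner scan, rephrased on the extracted column
def colScan (acc : List Char) : List Char → Bool × List Char
  | [] => (false, acc)
  | c :: rest => if c = '-' then (true, acc) else colScan (acc ++ [c]) rest

theorem pvScanColA_eq_colScan (i : Nat) (acc : List Char) (seqs : List (List Char)) :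
    pvScanColA i acc seqs = colScan acc (seqs.map (fun s => s.getD i ' ')) := by
  induction seqs generalizing acc with
  | nil => rfl
  | cons s rest ih =>
      simp only [pvScanColA, List.map_cons, colScan]
      split <;> simp [ih]

theorem colScan_fst (acc : List Char) (col : List Char) :
    (colScan acc col).1 = col.contains '-' := by
  induction col generalizing acc with
  | nil => simp [colScan]
  | cons c rest ih =>
      by_cases h : c = '-'
      · subst h; simp [colScan]
      · simp [colScan, h, ih]
        exact fun hh => absurd hh.symm h

theorem colScan_snd (acc : List Char) (col : List Char) (h : col.contains '-' = false) :
    (colScan acc col).2 = acc ++ col := by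
  induction col generalizing acc with
  | nil => simp [colScan]
  | cons c rest ih =>
      simp only [List.contains_cons, Bool.or_eq_false_iff, beq_eq_false_iff_ne, ne_eq] at h
      simp only [colScan, if_neg (fun hc : c = '-' => h.1 hc.symm), ih _ h.2, List.append_assoc,
        List.singleton_append]

theorem pvMismatchA_iff (c : Char) (l : List Char) :
    pvMismatchA c l = true ↔ ∃ x ∈ l, x ≠ c := by
  induction l generalizing c with
  | nil => simp [pvMismatchA]
  | cons x xs ih =>
      by_cases h : c = x
      · subst h; simp only [pvMismatchA, ne_eq, not_true_eq_false, if_false, ih]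
        simp
      · simp only [pvMismatchA, ne_eq, h, not_false_eq_true, if_true, true_iff]
        exact ⟨x, List.mem_cons_self, fun hx => h hx.symm⟩

-- ---- B-side characterisation (the final mask, read at one index) ----
-- does some later sequence mark column i?
def pvRestAny (first : List Char) (rest : List (List Char)) (i : Nat) : Bool :=
  rest.any (fun s => decide (i < (s.take first.length).length) &&
    ((s.take first.length).getD i ' ' == '-' ||
     (s.take first.length).getD i ' ' != first.getD i ' '))

-- the value of bad[i] after B's whole loop
def pvBadAt (first : List Char) (rest : List (List Char)) (i : Nat) : Bool :=
  (first.getD i ' ' == '-') || pvRestAny first rest i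

theorem pvMarkRow_length (first : List Char) (bad : List Bool) (ps : List (Int × Char)) :
    (pvMarkRow first bad ps).length = bad.length := by
  induction ps generalizing bad with
  | nil => rfl
  | cons p rest ih =>
      obtain ⟨j, c⟩ := p
      simp only [pvMarkRow]
      rw [ih]
      split <;> simp

theorem pvMarkRow_getD (first : List Char) (bad : List Bool) (ps : List (Int × Char)) (i : Nat)
    (hi : i < bad.length) (hpos : ∀ p ∈ ps, 0 ≤ p.1) :
    (pvMarkRow first bad ps).getD i false
      = (bad.getD i false ||
         ps.any (fun p => p.1 == (i : Int) && (p.2 == '-' || p.2 != first.getD i ' '))) := by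
  induction ps generalizing bad with
  | nil => simp [pvMarkRow]
  | cons p rest ih =>
      obtain ⟨j, c⟩ := p
      have hj0 : (0 : Int) ≤ j := hpos (j, c) (List.mem_cons_self)
      have hrest : ∀ p ∈ rest, 0 ≤ p.1 := fun p hp => hpos p (List.mem_cons_of_mem _ hp)
      simp only [pvMarkRow]
      by_cases hj : j = (i : Int)
      · have hjt : j.toNat = i := by omega
        rw [hjt]
        by_cases hc : (c == '-' || c != first.getD i ' ') = true
        · rw [if_pos hc, ih _ (by simp [hi]) hrest]
          have : (bad.set i true).getD i false = true := by
            rw [List.getD_eq_getElem _ _ (by simp [hi])]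
            simp [List.getElem_set_self]
          rw [this]
          simp only [List.any_cons, hj, beq_self_eq_true, Bool.true_and, hc, Bool.true_or,
            Bool.or_true]
        · rw [if_neg hc, ih _ hi hrest]
          simp only [Bool.not_eq_true] at hc
          simp only [List.any_cons, hj, beq_self_eq_true, Bool.true_and, hc, Bool.false_or]
      · have hne : ¬ ((j == (i : Int)) = true) := by simpa using hj
        have hgd : ∀ b : List Bool, b = bad ∨ b = bad.set j.toNat true →
            b.getD i false = bad.getD i false := by
          rintro b (rfl | rfl)
          · rfl
          · have hji : j.toNat ≠ i := by omega
            rw [List.getD_eq_getElem?_getD, List.getD_eq_getElem?_getD,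
              List.getElem?_set_ne hji]
        split
        · rw [ih _ (by simp [hi]) hrest, hgd _ (Or.inr rfl)]
          simp [hne]
        · rw [ih _ hi hrest, hgd _ (Or.inl rfl)]
          simp [hne]

theorem any_enumerate_eq (first t : List Char) (i : Nat) :
    ((PySem.List.enumerate t 0).any
        (fun p => p.1 == (i : Int) && (p.2 == '-' || p.2 != first.getD i ' ')))
      = (decide (i < t.length) &&
         (t.getD i ' ' == '-' || t.getD i ' ' != first.getD i ' ')) := by
  rw [Bool.eq_iff_iff]
  simp only [List.any_eq_true, PySem.List.mem_enumerate_iff, Bool.and_eq_true, beq_iff_eq,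
    decide_eq_true_eq]
  constructor
  · rintro ⟨p, ⟨k, hk, rfl⟩, h1, h2⟩
    have hki : k = i := by simpa using h1
    subst hki
    refine ⟨hk, ?_⟩
    rwa [List.getD_eq_getElem _ _ hk]
  · rintro ⟨hk, hq⟩
    refine ⟨((i : Int), t[i]), ⟨i, hk, by simp⟩, by simp, ?_⟩
    rwa [List.getD_eq_getElem _ _ hk] at hq

theorem enumerate_pos (t : List Char) : ∀ p ∈ PySem.List.enumerate t 0, (0:Int) ≤ p.1 := by
  intro p hp
  rcases (PySem.List.mem_enumerate_iff _ _ _).1 hp with ⟨k, hk, rfl⟩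
  simp

theorem foldl_mark_length (first : List Char) (rest : List (List Char)) (bad0 : List Bool) :
    (rest.foldl (fun bad s =>
        pvMarkRow first bad (PySem.List.enumerate (s.take first.length) 0)) bad0).length
      = bad0.length := by
  induction rest generalizing bad0 with
  | nil => rfl
  | cons s rs ih => rw [List.foldl_cons, ih, pvMarkRow_length]

theorem foldl_mark_getD (first : List Char) (rest : List (List Char)) (bad0 : List Bool)
    (i : Nat) (hi : i < bad0.length) :
    (rest.foldl (fun bad s =>
        pvMarkRow first bad (PySem.List.enumerate (s.take first.length) 0)) bad0).getD i false
      = (bad0.getD i false || pvRestAny first rest i) := by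
  induction rest generalizing bad0 with
  | nil => simp [pvRestAny]
  | cons s rs ih =>
      rw [List.foldl_cons,
        ih _ (by rw [pvMarkRow_length]; exact hi),
        pvMarkRow_getD _ _ _ _ hi (enumerate_pos _),
        any_enumerate_eq first]
      simp [pvRestAny, Bool.or_assoc]

-- counting trues in a Bool list = counting the indices where it reads true
theorem countP_id_eq_range (l : List Bool) :
    l.countP (fun b => b) = (List.range l.length).countP (fun i => l.getD i false) := by
  induction l with
  | nil => simp
  | cons b t ih =>
      rw [List.length_cons, List.range_succ_eq_map, List.countP_cons, List.countP_cons,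
        List.countP_map, ih]
      have hcomp : ((fun i => (b :: t).getD i false) ∘ Nat.succ)
          = (fun i => t.getD i false) := by
        funext k; simp
      rw [hcomp]
      simp only [List.getD_cons_zero]

-- ---- the per-column equality: under Pre_'s column condition, A's column bit = B's mask bit ----
theorem colBool_eq (first : List Char) (rest : List (List Char)) (i : Nat)
    (hiL : i < first.length)
    (hQ : ∀ k < (first :: rest).length, ((first :: rest).getD k []).length ≤ i →
          ∃ j < k, ((first :: rest).getD j []).getD i ' ' = '-') :
    pvColBoolA (first :: rest) i = pvBadAt first rest i := by
  unfold pvColBoolA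
  rw [pvScanColA_eq_colScan]
  show (if (colScan [] ((first :: rest).map (fun s => s.getD i ' '))).1 = true then true
        else pvMismatchList (colScan [] ((first :: rest).map (fun s => s.getD i ' '))).2)
      = pvBadAt first rest i
  rw [colScan_fst]
  by_cases hd : ((first :: rest).map (fun s => s.getD i ' ')).contains '-' = true
  · -- some sequence has '-' in column i: both sides are true
    rw [hd]
    simp only [if_true]
    have : ∃ s ∈ first :: rest, s.getD i ' ' = '-' := by
      rcases List.mem_map.1 (List.mem_of_elem_eq_true hd) with ⟨s, hs, hval⟩
      exact ⟨s, hs, hval⟩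
    rcases this with ⟨s, hs, hval⟩
    rcases List.mem_cons.1 hs with rfl | hs'
    · symm
      simp only [pvBadAt, Bool.or_eq_true, beq_iff_eq]
      exact Or.inl hval
    · have hrange : i < s.length := by
        by_contra hge
        rw [List.getD_eq_default _ _ (by omega)] at hval
        exact absurd hval (by decide)
      have htl : i < (s.take first.length).length := by
        simp only [List.length_take]; omega
      have htv : (s.take first.length).getD i ' ' = '-' := by
        rw [List.getD_eq_getElem _ _ htl, List.getElem_take,
          ← List.getD_eq_getElem _ _ hrange, hval]
      symm
      simp only [pvBadAt, pvRestAny, Bool.or_eq_true, List.any_eq_true, Bool.and_eq_true,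
        decide_eq_true_eq, beq_iff_eq, bne_iff_ne]
      exact Or.inr ⟨s, hs', htl, Or.inl htv⟩
  · -- no '-' in column i: every access is in range; compare mismatch tests
    have hd' : ((first :: rest).map (fun s => s.getD i ' ')).contains '-' = false := by
      simpa using hd
    rw [hd']
    simp only [Bool.false_eq_true, if_false]
    rw [colScan_snd _ _ hd', List.nil_append]
    have hnod : ∀ s ∈ first :: rest, s.getD i ' ' ≠ '-' := by
      intro s hs hc
      rw [Bool.eq_false_iff] at hd'
      exact hd' (List.elem_eq_true_of_mem (List.mem_map.2 ⟨s, hs, hc⟩))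
    have hrange : ∀ s ∈ first :: rest, i < s.length := by
      intro s hs
      by_contra hge
      rcases List.mem_iff_getElem.1 hs with ⟨k, hk, rfl⟩
      rcases hQ k hk (by rw [List.getD_eq_getElem _ _ hk]; omega) with ⟨j, hjk, hdash⟩
      have hjlen : j < (first :: rest).length := by omega
      refine hnod ((first :: rest).getD j []) ?_ ?_
      · rw [List.getD_eq_getElem _ _ hjlen]; exact List.getElem_mem _
      · exact hdash
    have hfnod : ¬ ((first.getD i ' ' == '-') = true) := by
      simpa using hnod first List.mem_cons_self
    simp only [List.map_cons, pvMismatchList, pvBadAt, Bool.eq_false_iff.2 hfnod, Bool.false_or]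
    rw [Bool.eq_iff_iff, pvMismatchA_iff]
    simp only [pvRestAny, List.any_eq_true, Bool.and_eq_true, decide_eq_true_eq, Bool.or_eq_true,
      beq_iff_eq, bne_iff_ne]
    constructor
    · rintro ⟨x, hx, hne⟩
      rcases List.mem_map.1 hx with ⟨s, hs, rfl⟩
      have hsl : i < s.length := hrange s (List.mem_cons_of_mem _ hs)
      have htl : i < (s.take first.length).length := by
        simp only [List.length_take]; omega
      have htv : (s.take first.length).getD i ' ' = s.getD i ' ' := by
        rw [List.getD_eq_getElem _ _ htl, List.getElem_take, ← List.getD_eq_getElem _ _ hsl]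
      exact ⟨s, hs, htl, Or.inr (by rw [htv]; exact hne)⟩
    · rintro ⟨s, hs, hlt, hb⟩
      have hsl : i < s.length := hrange s (List.mem_cons_of_mem _ hs)
      have htl : i < (s.take first.length).length := by
        simp only [List.length_take]; omega
      have htv : (s.take first.length).getD i ' ' = s.getD i ' ' := by
        rw [List.getD_eq_getElem _ _ htl, List.getElem_take, ← List.getD_eq_getElem _ _ hsl]
      rw [htv] at hb
      rcases hb with hc | hne
      · exact absurd hc (hnod s (List.mem_cons_of_mem _ hs))
      · exact ⟨s.getD i ' ', List.mem_map.2 ⟨s, hs, rfl⟩, hne⟩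

-- ---- assembling both counts over the columns ----
theorem main_eq (first : List Char) (rest : List (List Char))
    (hQ : ∀ i < ((first :: rest).headD []).length, ∀ k < (first :: rest).length,
          (((first :: rest).getD k []).length ≤ i →
            ∃ j < k, ((first :: rest).getD j []).getD i ' ' = '-')) :
    (PySem.List.pyRange 0 (((first :: rest).headD []).length : Int) 1).foldl
      (fun count i => if pvColBoolA (first :: rest) i.toNat then count + 1 else count) (0 : Int)
    = ((((rest.foldl (fun bad s =>
          pvMarkRow first bad (PySem.List.enumerate (s.take first.length) 0))
          (first.map (fun c => c == '-'))).countP (fun b => b)) : Nat) : Int) := by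
  have hhead : ((first :: rest).headD []) = first := rfl
  rw [hhead] at hQ ⊢
  -- A's fold is a countP over the range of columns
  rw [PySem.List.foldl_if_add_one, zero_add, PySem.List.pyRange_one]
  simp only [sub_zero, Int.toNat_natCast, zero_add, List.countP_map]
  -- B's mask count is a countP over the same range
  have hlen0 : (first.map (fun c => c == '-')).length = first.length := by simp
  rw [countP_id_eq_range, foldl_mark_length, hlen0]
  congr 1
  apply List.countP_congr
  intro i hi
  have hiL : i < first.length := List.mem_range.1 hi
  rw [Function.comp_apply, Int.toNat_natCast, colBool_eq first rest i hiL (hQ i hiL),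
    foldl_mark_getD _ _ _ _ (by rw [hlen0]; exact hiL)]
  have hb0 : (first.map (fun c => c == '-')).getD i false = (first.getD i ' ' == '-') := by
    rw [List.getD_eq_getElem _ _ (by rw [hlen0]; exact hiL), List.getElem_map,
      List.getD_eq_getElem _ _ hiL]
  rw [hb0]
  rfl

theorem main_eq' (seqs : List (List Char)) (hne : seqs ≠ [])
    (hQ : ∀ i < (seqs.headD []).length, ∀ k < seqs.length,
          ((seqs.getD k []).length ≤ i →
            ∃ j < k, (seqs.getD j []).getD i ' ' = '-')) :
    (PySem.List.pyRange 0 ((seqs.headD []).length : Int) 1).foldl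
      (fun count i => if pvColBoolA seqs i.toNat then count + 1 else count) (0 : Int)
    = ((((seqs.drop 1).foldl (fun bad s =>
          pvMarkRow (seqs.headD []) bad (PySem.List.enumerate (s.take (seqs.headD []).length) 0))
          ((seqs.headD []).map (fun c => c == '-'))).countP (fun b => b) : Nat) : Int) := by
  cases seqs with
  | nil => exact absurd rfl hne
  | cons first rest => simpa using main_eq first rest hQ

-- ===== VERDICT (by name: the statement is the Claim_ definition above) =====
theorem countIndelsMismatches_spec : Claim_equal_countIndelsMismatches := by
  intro d _ hpre
  unfold Spec_countIndelsMismatches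
  simp only [countIndelsMismatches, countIndelsMismatches_alt, pvVals]
  obtain ⟨hne, hQ⟩ := hpre
  exact main_eq' _ hne hQ
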